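-- pv_equiv track=rewrite | github.com/ebelo/x-daily-summary | main.py | _process_truncate_section
-- ===== SOURCE A (Python) =====
-- def _process_truncate_section(section_lines: list[str], current_total: int, limit: int) -> tuple[str, int]:
--     """Helper to process a section's posts and truncate them to fit the limit."""
--     post_end_indices = [i for i, l in enumerate(section_lines) if "[View post](" in l]
--
--     if not post_end_indices:
--         return "", 0
--
--     current_section = [section_lines[0]]  # Add ## @author line
--     last_e = 1
--     posts_added = 0
--
--     for e in post_end_indices:
--         if current_total + posts_added >= limit:
--             break
--         current_section.append("\n".join(section_lines[last_e:e+1]))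
--         posts_added += 1
--         last_e = e + 1
--
--     if posts_added > 0:
--         return "\n".join(current_section), posts_added
--     return "", 0
-- ===== SOURCE B (Python) =====
-- def _process_truncate_section(section_lines: list[str], current_total: int, limit: int) -> tuple[str, int]:
--     """Single streaming pass: buffer the current post's lines, emit a post at each
--     '[View post](' marker while the budget allows."""
--     budget = limit - current_total
--     posts = []
--     buf = []
--     seen = False
--     for i, line in enumerate(section_lines):
--         if i >= 1:
--             buf.append(line)
--         if "[View post](" in line:
--             seen = True
--             if len(posts) >= budget:
--                 break
--             posts.append("\n".join(buf))
--             buf = []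
--     if not seen or not posts:
--         return "", 0
--     return "\n".join([section_lines[0]] + posts), len(posts)
-- ===== Notes on version B (the rewrite author's own statement) =====
-- stated objective: alternative
-- what changed: B replaces A's two-phase plan (build the list of marker indices via enumerate, then slice section_lines[last_e:e+1] for each index) by a single streaming pass that buffers the current post's lines and emits a post at each '[View post](' marker, tracking a seen flag; same return value everywhere.
import Mathlib
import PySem

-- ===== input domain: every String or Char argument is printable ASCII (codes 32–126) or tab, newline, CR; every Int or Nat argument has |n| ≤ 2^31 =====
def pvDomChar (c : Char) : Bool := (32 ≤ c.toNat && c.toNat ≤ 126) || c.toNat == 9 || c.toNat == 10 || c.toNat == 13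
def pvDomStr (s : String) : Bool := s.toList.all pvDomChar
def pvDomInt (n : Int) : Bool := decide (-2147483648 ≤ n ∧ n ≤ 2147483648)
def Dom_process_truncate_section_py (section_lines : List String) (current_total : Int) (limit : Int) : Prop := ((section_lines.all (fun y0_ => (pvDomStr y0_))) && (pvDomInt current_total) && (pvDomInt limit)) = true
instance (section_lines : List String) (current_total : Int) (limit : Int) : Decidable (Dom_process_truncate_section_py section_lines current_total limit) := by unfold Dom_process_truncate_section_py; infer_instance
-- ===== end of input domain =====

-- B replaces A's marker-index comprehension plus repeated list slicing by a single streaming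
-- pass with a line buffer (objective: alternative decomposition; same return value).

-- ===== PORT A =====
-- the marker literal "[View post]("
def pvMark : String := "[View post]("

-- A's for-loop over post_end_indices with its break; state = (current_section, last_e, posts_added)
def pyALoop (section_lines : List String) (current_total : Int) (limit : Int) :
    List Int → List String → Int → Int → List String × Int
  | [], cur, _, k => (cur, k)
  | e :: rest, cur, last_e, k =>
    if limit ≤ current_total + k then (cur, k)
    else pyALoop section_lines current_total limit rest
      (cur ++ [PySem.Str.join "\n" (PySem.List.slice section_lines (some last_e) (some (e + 1)))])
      (e + 1) (k + 1)

def process_truncate_section_py (section_lines : List String) (current_total : Int) (limit : Int) : String × Int :=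
  let post_end_indices :=
    ((PySem.List.enumerate section_lines 0).filter (fun p => PySem.Str.isIn pvMark p.2)).map (·.1)
  if post_end_indices = [] then ("", 0)
  else
    -- section_lines[0]: only reached when a marker exists, so the list is nonempty and `.getD ""` is never used
    let st := pyALoop section_lines current_total limit post_end_indices
      [(PySem.List.pyGet? section_lines 0).getD ""] 1 0
    if 0 < st.2 then (PySem.Str.join "\n" st.1, st.2) else ("", 0)

-- ===== PORT B =====
-- B's for-loop over enumerate(section_lines) with its break; state = (buf, posts, seen)
def pyBLoop (budget : Int) :
    List (Int × String) → List String → List String → Bool → List String × List String × Bool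
  | [], buf, posts, seen => (buf, posts, seen)
  | (i, line) :: rest, buf, posts, seen =>
    let buf := if 1 ≤ i then buf ++ [line] else buf
    if PySem.Str.isIn pvMark line then
      if budget ≤ (posts.length : Int) then (buf, posts, true)
      else pyBLoop budget rest [] (posts ++ [PySem.Str.join "\n" buf]) true
    else pyBLoop budget rest buf posts seen

def process_truncate_section_py_alt (section_lines : List String) (current_total : Int) (limit : Int) : String × Int :=
  let budget := limit - current_total
  let st := pyBLoop budget (PySem.List.enumerate section_lines 0) [] [] false
  if st.2.2 = false ∨ st.2.1 = [] then ("", 0)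
  else (PySem.Str.join "\n" (((PySem.List.pyGet? section_lines 0).getD "") :: st.2.1),
        (st.2.1.length : Int))

-- ===== PRECONDITION & SPEC =====
def Spec_process_truncate_section_py (section_lines : List String) (current_total : Int) (limit : Int) (out : String × Int) : Prop := out = process_truncate_section_py_alt section_lines current_total limit
instance (section_lines : List String) (current_total : Int) (limit : Int) (out : String × Int) : Decidable (Spec_process_truncate_section_py section_lines current_total limit out) := by unfold Spec_process_truncate_section_py; infer_instance

-- ===== CLAIM (what is proved, stated in full; the proofs are below) =====
def Claim_equal_process_truncate_section_py : Prop := ∀ (section_lines : List String) (current_total : Int) (limit : Int), Dom_process_truncate_section_py section_lines current_total limit → Spec_process_truncate_section_py section_lines current_total limit (process_truncate_section_py section_lines current_total limit)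

-- ===== LEMMAS AND PROOFS =====

-- marker test, proof-side shorthand
def hasM (s : String) : Bool := PySem.Str.isIn pvMark s

-- groups of tail lines, split after each marker line (B's buffer discipline)
def grp : List String → List String → List (List String)
  | _, [] => []
  | buf, x :: xs => if hasM x then (buf ++ [x]) :: grp [] xs else grp (buf ++ [x]) xs

-- the marker indices, structurally
def idxAux : List String → Int → List Int
  | [], _ => []
  | x :: xs, s => if hasM x then s :: idxAux xs (s + 1) else idxAux xs (s + 1)

-- A's slices as groups
def sliceG (lines : List String) : List Int → Int → List (List String)
  | [], _ => []
  | e :: rest, last_e =>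
    PySem.List.slice lines (some last_e) (some (e + 1)) :: sliceG lines rest (e + 1)

-- common characterization of both programs
def specPosts (lines : List String) : List (List String) :=
  match lines with
  | [] => []
  | h :: t => if hasM h then ([] : List String) :: grp [] t else grp [] t

def finish (lines : List String) (ct lim : Int) : String × Int :=
  let ps := (((specPosts lines).map (PySem.Str.join "\n")).take (lim - ct).toNat)
  if ps = [] then ("", 0)
  else (PySem.Str.join "\n" (((PySem.List.pyGet? lines 0).getD "") :: ps), (ps.length : Int))

theorem idx_eq (lines : List String) (s : Int) :
    ((PySem.List.enumerate lines s).filter (fun p => PySem.Str.isIn pvMark p.2)).map (·.1)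
      = idxAux lines s := by
  induction lines generalizing s with
  | nil => simp [PySem.List.enumerate_nil, idxAux]
  | cons x xs ih =>
    simp only [PySem.Str.isIn] at ih
    rw [PySem.List.enumerate_cons, List.filter_cons]
    simp only [idxAux, hasM, PySem.Str.isIn]
    by_cases h : PySem.Chars.isIn pvMark.toList x.toList = true
    · simp [h, ih]
    · simp [h, ih]
theorem noAny (t : List String) (h : t.any hasM = false) : ∀ buf, grp buf t = [] := by
  induction t with
  | nil => intro buf; simp [grp]
  | cons x xs ih =>
    intro buf
    simp only [List.any_cons, Bool.or_eq_false_iff] at h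
    simp [grp, h.1, ih h.2]

theorem idxAux_nil_any (t : List String) : ∀ s, idxAux t s = [] → t.any hasM = false := by
  induction t with
  | nil => intro s _; rfl
  | cons x xs ih =>
    intro s h
    simp only [idxAux] at h
    by_cases hx : hasM x = true
    · simp [hx] at h
    · rw [if_neg hx] at h
      simp [List.any_cons, hx, ih _ h]

theorem loopA_take (lines : List String) (ct lim : Int) (idxs : List Int)
    (cur : List String) (last_e k : Int) :
    pyALoop lines ct lim idxs cur last_e k =
      (cur ++ ((sliceG lines idxs last_e).map (PySem.Str.join "\n")).take (lim - ct - k).toNat,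
       k + (((sliceG lines idxs last_e).map (PySem.Str.join "\n")).take (lim - ct - k).toNat).length) := by
  induction idxs generalizing cur last_e k with
  | nil => simp [pyALoop, sliceG]
  | cons e rest ih =>
    simp only [pyALoop, sliceG, List.map_cons]
    by_cases h : lim ≤ ct + k
    · have : (lim - ct - k).toNat = 0 := by omega
      simp [this, h]
    · have h1 : (lim - ct - k).toNat = (lim - ct - (k + 1)).toNat + 1 := by omega
      rw [if_neg h, ih, h1, List.take_succ_cons]
      simp only [List.length_cons, List.append_assoc, List.singleton_append, Prod.mk.injEq]
      refine ⟨trivial, by push_cast; ring⟩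
theorem take_drop_succ (lines : List String) (j last_e : ℕ) (x : String) (t' : List String)
    (hd : lines.drop j = x :: t') (hle : last_e ≤ j) :
    (lines.drop last_e).take (j + 1 - last_e) = (lines.drop last_e).take (j - last_e) ++ [x] := by
  have hj : j < lines.length := by
    by_contra hc
    rw [List.drop_eq_nil_of_le (by omega)] at hd
    simp at hd
  have hget : (lines.drop last_e)[j - last_e]? = some x := by
    rw [List.getElem?_drop]
    have hle' : last_e + (j - last_e) = j := by omega
    rw [hle']
    have h2 : lines[j]? = (lines.drop j).head? := by rw [List.head?_drop]
    rw [h2, hd]; rfl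
  have h3 : j + 1 - last_e = (j - last_e) + 1 := by omega
  rw [h3, List.take_succ, hget]; rfl

theorem sliceG_grp (lines : List String) (t : List String) :
    ∀ (j last_e : ℕ), 1 ≤ last_e → last_e ≤ j → lines.drop j = t →
    sliceG lines (idxAux t (j : Int)) (last_e : Int)
      = grp ((lines.drop last_e).take (j - last_e)) t := by
  induction t with
  | nil => intro j last_e _ _ _; simp [idxAux, sliceG, grp]
  | cons x t' ih =>
    intro j last_e h1 h2 hd
    have hd' : lines.drop (j + 1) = t' := by
      rw [← List.tail_drop, hd]; rfl
    have hcast : ((j : Int) + 1) = ((j + 1 : ℕ) : Int) := by push_cast; ring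
    simp only [idxAux, grp]
    by_cases hx : hasM x = true
    · rw [if_pos hx, if_pos hx]
      simp only [sliceG]
      rw [hcast]
      rw [PySem.List.slice_natCast lines last_e (j+1), take_drop_succ lines j last_e x t' hd h2]
      congr 1
      have hih := ih (j + 1) (j + 1) (by omega) (by omega) hd'
      simpa using hih
    · rw [if_neg hx, if_neg hx, hcast]
      rw [ih (j + 1) last_e h1 (by omega) hd', take_drop_succ lines j last_e x t' hd h2]
theorem A_char (lines : List String) (ct lim : Int) :
    process_truncate_section_py lines ct lim = finish lines ct lim := by
  cases lines with
  | nil =>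
    simp [process_truncate_section_py, finish, specPosts, PySem.List.enumerate_nil]
  | cons h t =>
    unfold process_truncate_section_py
    rw [idx_eq]
    by_cases hidx : idxAux (h :: t) 0 = []
    · rw [if_pos hidx]
      have hany : (h :: t).any hasM = false := idxAux_nil_any _ _ hidx
      simp only [List.any_cons, Bool.or_eq_false_iff] at hany
      have hsp : specPosts (h :: t) = [] := by
        simp only [specPosts, hany.1, Bool.false_eq_true, if_false]
        exact noAny t hany.2 []
      simp [finish, hsp]
    · rw [if_neg hidx]
      have hG : sliceG (h :: t) (idxAux (h :: t) 0) 1 = specPosts (h :: t) := by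
        have hmain := sliceG_grp (h :: t) t 1 1 (by omega) (by omega) rfl
        simp only [Nat.sub_self, List.take_zero, Nat.cast_one] at hmain
        simp only [idxAux, specPosts]
        by_cases hh : hasM h = true
        · rw [if_pos hh, if_pos hh]
          simp only [sliceG]
          norm_num [hmain]
          have : PySem.List.slice (h :: t) (some ((1:ℕ):Int)) (some ((1:ℕ):Int))
            = ((h :: t).drop 1).take (1 - 1) := PySem.List.slice_natCast (h :: t) 1 1
          simpa using this
        · rw [if_neg hh, if_neg hh]
          norm_num [hmain]
      rw [loopA_take, hG]
      unfold finish
      simp only [sub_zero]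
      by_cases hps : ((specPosts (h :: t)).map (PySem.Str.join "\n")).take (lim - ct).toNat = []
      · simp [hps]
      · have hlen : 0 < (((specPosts (h :: t)).map (PySem.Str.join "\n")).take (lim - ct).toNat).length :=
          List.length_pos_iff.mpr hps
        rw [if_neg hps]
        have hpos : (0 : Int) < 0 + (((specPosts (h :: t)).map (PySem.Str.join "\n")).take (lim - ct).toNat).length := by
          omega
        rw [if_pos hpos]
        simp [PySem.List.pyGet?, PySem.List.pyIdx?]
theorem loopB_take (bud : Int) (t : List String) :
    ∀ (s : Int) (buf posts : List String) (seen : Bool), 1 ≤ s →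
    pyBLoop bud (PySem.List.enumerate t s) buf posts seen =
      ((pyBLoop bud (PySem.List.enumerate t s) buf posts seen).1,
       posts ++ ((grp buf t).map (PySem.Str.join "\n")).take (bud - posts.length).toNat,
       seen || t.any hasM) := by
  induction t with
  | nil => intro s buf posts seen _; simp [PySem.List.enumerate_nil, pyBLoop, grp]
  | cons x t' ih =>
    intro s buf posts seen hs
    rw [PySem.List.enumerate_cons]
    simp only [pyBLoop, hs, if_pos, List.any_cons]
    by_cases hx : hasM x = true
    · have hx' : PySem.Str.isIn pvMark x = true := hx
      rw [if_pos hx']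
      by_cases hb : bud ≤ (posts.length : Int)
      · rw [if_pos hb]
        simp only [grp, hx, if_pos, List.map_cons]
        have h0 : (bud - posts.length).toNat = 0 := by omega
        simp [h0]
      · rw [if_neg hb]
        rw [ih (s+1) [] (posts ++ [PySem.Str.join "\n" (buf ++ [x])]) true (by omega)]
        simp only [grp, hx, if_pos, List.map_cons]
        have h1 : (bud - posts.length).toNat = (bud - ((posts.length : Int) + 1)).toNat + 1 := by
          omega
        rw [h1, List.take_succ_cons]
        simp
    · have hx' : PySem.Chars.isIn pvMark.toList x.toList = false := by
        have h0 := hx; rw [hasM, PySem.Str.isIn] at h0; simpa using h0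
      rw [if_neg (by simp [PySem.Str.isIn, hx'])]
      rw [ih (s+1) (buf ++ [x]) posts seen (by omega)]
      simp [grp, hx]
theorem B_char (lines : List String) (ct lim : Int) :
    process_truncate_section_py_alt lines ct lim = finish lines ct lim := by
  cases lines with
  | nil =>
    simp [process_truncate_section_py_alt, finish, specPosts, PySem.List.enumerate_nil, pyBLoop]
  | cons h t =>
    unfold process_truncate_section_py_alt
    rw [PySem.List.enumerate_cons]
    simp only [pyBLoop]
    rw [if_neg (show ¬((1:Int) ≤ 0) by norm_num)]
    norm_num
    by_cases hh : hasM h = true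
    · have hhC : PySem.Chars.isIn pvMark.toList h.toList = true := by
        have h0 := hh; rw [hasM, PySem.Str.isIn] at h0; simpa using h0
      simp only [if_pos hhC]
      by_cases hb : lim ≤ ct
      · simp only [if_pos hb]
        have h0 : (lim - ct).toNat = 0 := by omega
        simp [finish, h0]
      · simp only [if_neg hb]
        rw [loopB_take (lim - ct) t 1 [] [PySem.Str.join "\n" []] true (by omega)]
        simp only [finish, specPosts, hh, if_pos, List.map_cons]
        have h1 : (lim - ct).toNat
            = (lim - ct - (([PySem.Str.join "\n" []] : List String).length : Int)).toNat + 1 := by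
          simp only [List.length_cons, List.length_nil]; omega
        rw [h1, List.take_succ_cons]
        rw [if_neg (by simp)]
        rw [if_neg (by simp)]
        simp [PySem.List.pyGet?, PySem.List.pyIdx?]
    · have hhC : PySem.Chars.isIn pvMark.toList h.toList = false := by
        have h0 := hh; rw [hasM, PySem.Str.isIn] at h0; simpa using h0
      simp only [hhC, Bool.false_eq_true, if_false]
      rw [loopB_take (lim - ct) t 1 [] [] false (by omega)]
      simp only [finish, specPosts, hh, Bool.false_eq_true, if_false, List.nil_append,
        List.length_nil, Nat.cast_zero, sub_zero, Bool.false_or]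
      by_cases hps : ((grp [] t).map (PySem.Str.join "\n")).take (lim - ct).toNat = []
      · simp [hps]
      · rw [if_neg (by
          intro hc
          rcases hc with hc | hc
          · have hany : t.any hasM = false := by simpa using hc
            rw [noAny t hany []] at hps
            simp at hps
          · exact hps hc)]
        rw [if_neg hps]
        simp [PySem.List.pyGet?, PySem.List.pyIdx?]

-- ===== VERDICT (by name: the statement is the Claim_ definition above) =====
theorem process_truncate_section_py_spec : Claim_equal_process_truncate_section_py := by
  intro lines ct lim _
  unfold Spec_process_truncate_section_py
  rw [A_char, B_char]
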